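-- pv_equiv track=rewrite | github.com/bsvalues/TerraFusionPro | scripts/cleanup_typescript.py | categorize_errors
-- ===== SOURCE A (Python) =====
-- def categorize_errors(errors):
--     categories = {
--         'type_missing': [],
--         'type_mismatch': [],
--         'unused_code': [],
--         'import_issues': [],
--         'other': []
--     }
--
--     for error in errors:
--         if 'TS2307' in error or 'TS2304' in error:
--             categories['type_missing'].append(error)
--         elif 'TS2322' in error or 'TS2345' in error:
--             categories['type_mismatch'].append(error)
--         elif 'TS6133' in error or 'TS6134' in error:
--             categories['unused_code'].append(error)
--         elif 'TS2306' in error or 'TS2305' in error: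
--             categories['import_issues'].append(error)
--         else:
--             categories['other'].append(error)
--
--     return categories
-- ===== SOURCE B (Python) =====
-- def categorize_errors(errors):
--     # Sieve of successive partitions: each stage splits off its bucket from a
--     # shrinking remainder; stage order realizes A's branch priority.
--     table = [
--         ('type_missing', ('TS2307', 'TS2304')),
--         ('type_mismatch', ('TS2322', 'TS2345')),
--         ('unused_code', ('TS6133', 'TS6134')),
--         ('import_issues', ('TS2306', 'TS2305')),
--     ]
--     result = {}
--     remaining = list(errors)
--     for cat, codes in table:
--         result[cat] = [e for e in remaining if any(c in e for c in codes)]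
--         remaining = [e for e in remaining if not any(c in e for c in codes)]
--     result['other'] = remaining
--     return result
-- ===== Notes on version B (the rewrite author's own statement) =====
-- stated objective: alternative
-- what changed: Replaced A's single pass with a five-way if/elif append per error by a staged sieve: four successive partition passes, each filtering its bucket out of a shrinking remainder (stage order supplies the branch priority), the final remainder becoming 'other'.
import Mathlib
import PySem

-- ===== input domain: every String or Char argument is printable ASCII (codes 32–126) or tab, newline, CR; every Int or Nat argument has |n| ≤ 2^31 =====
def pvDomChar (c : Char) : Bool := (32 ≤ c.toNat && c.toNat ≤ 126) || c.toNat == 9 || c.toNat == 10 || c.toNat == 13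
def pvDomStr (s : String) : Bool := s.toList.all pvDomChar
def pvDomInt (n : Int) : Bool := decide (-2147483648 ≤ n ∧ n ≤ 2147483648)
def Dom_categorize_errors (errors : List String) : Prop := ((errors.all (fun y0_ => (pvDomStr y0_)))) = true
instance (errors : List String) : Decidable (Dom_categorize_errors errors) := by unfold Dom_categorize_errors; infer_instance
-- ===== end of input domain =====

-- B replaces A's single-pass if/elif append loop by a staged sieve of four partition passes over a shrinking remainder (alternative decomposition, same cost).

-- ===== PORT A =====
def categorize_errors (errors : List String) : List (String × List String) :=
  let categories : PySem.Dict String (List String) :=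
    PySem.Dict.ofList
      [("type_missing", []), ("type_mismatch", []), ("unused_code", []),
       ("import_issues", []), ("other", [])]
  let categories := errors.foldl (fun cat error =>
    if PySem.Str.isIn "TS2307" error || PySem.Str.isIn "TS2304" error then
      cat.modify "type_missing" [] (· ++ [error])
    else if PySem.Str.isIn "TS2322" error || PySem.Str.isIn "TS2345" error then
      cat.modify "type_mismatch" [] (· ++ [error])
    else if PySem.Str.isIn "TS6133" error || PySem.Str.isIn "TS6134" error then
      cat.modify "unused_code" [] (· ++ [error])
    else if PySem.Str.isIn "TS2306" error || PySem.Str.isIn "TS2305" error then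
      cat.modify "import_issues" [] (· ++ [error])
    else
      cat.modify "other" [] (· ++ [error])) categories
  categories.items

-- ===== PORT B =====
def pvTable : List (String × List String) :=
  [("type_missing", ["TS2307", "TS2304"]),
   ("type_mismatch", ["TS2322", "TS2345"]),
   ("unused_code", ["TS6133", "TS6134"]),
   ("import_issues", ["TS2306", "TS2305"])]

def categorize_errors_alt (errors : List String) : List (String × List String) :=
  let r := pvTable.foldl (fun (st : List (String × List String) × List String) p =>
      (st.1 ++ [(p.1, st.2.filter (fun e => p.2.any (fun c => PySem.Str.isIn c e)))],
       st.2.filter (fun e => !(p.2.any (fun c => PySem.Str.isIn c e)))))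
    ([], errors)
  r.1 ++ [("other", r.2)]

-- ===== PRECONDITION & SPEC =====
def Spec_categorize_errors (errors : List String) (out : List (String × List String)) : Prop := out = categorize_errors_alt errors
instance (errors : List String) (out : List (String × List String)) : Decidable (Spec_categorize_errors errors out) := by unfold Spec_categorize_errors; infer_instance

-- ===== CLAIM =====
def Claim_equal_categorize_errors : Prop := ∀ (errors : List String), Dom_categorize_errors errors → Spec_categorize_errors errors (categorize_errors errors)

-- ===== LEMMAS AND PROOFS =====

def pvC1 (e : String) : Bool := PySem.Str.isIn "TS2307" e || PySem.Str.isIn "TS2304" e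
def pvC2 (e : String) : Bool := PySem.Str.isIn "TS2322" e || PySem.Str.isIn "TS2345" e
def pvC3 (e : String) : Bool := PySem.Str.isIn "TS6133" e || PySem.Str.isIn "TS6134" e
def pvC4 (e : String) : Bool := PySem.Str.isIn "TS2306" e || PySem.Str.isIn "TS2305" e

def pvB1 (es : List String) : List String := es.filter pvC1
def pvB2 (es : List String) : List String := es.filter (fun e => pvC2 e && !pvC1 e)
def pvB3 (es : List String) : List String := es.filter (fun e => pvC3 e && (!pvC2 e && !pvC1 e))
def pvB4 (es : List String) : List String := es.filter (fun e => pvC4 e && (!pvC3 e && (!pvC2 e && !pvC1 e)))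
def pvB5 (es : List String) : List String := es.filter (fun e => !pvC4 e && (!pvC3 e && (!pvC2 e && !pvC1 e)))

lemma fold_invariant (es : List String) (a b c d e : List String) :
    (es.foldl (fun cat error =>
      if PySem.Str.isIn "TS2307" error || PySem.Str.isIn "TS2304" error then
        cat.modify "type_missing" [] (· ++ [error])
      else if PySem.Str.isIn "TS2322" error || PySem.Str.isIn "TS2345" error then
        cat.modify "type_mismatch" [] (· ++ [error])
      else if PySem.Str.isIn "TS6133" error || PySem.Str.isIn "TS6134" error then
        cat.modify "unused_code" [] (· ++ [error])
      else if PySem.Str.isIn "TS2306" error || PySem.Str.isIn "TS2305" error then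
        cat.modify "import_issues" [] (· ++ [error])
      else
        cat.modify "other" [] (· ++ [error]))
      (PySem.Dict.mk
          [("type_missing", a), ("type_mismatch", b), ("unused_code", c),
           ("import_issues", d), ("other", e)])).items =
      [("type_missing", a ++ pvB1 es),
       ("type_mismatch", b ++ pvB2 es),
       ("unused_code", c ++ pvB3 es),
       ("import_issues", d ++ pvB4 es),
       ("other", e ++ pvB5 es)] := by
  induction es generalizing a b c d e with
  | nil => simp [pvB1, pvB2, pvB3, pvB4, pvB5]
  | cons x xs ih =>
    by_cases h1 : (PySem.Str.isIn "TS2307" x || PySem.Str.isIn "TS2304" x) = true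
    · have hc : pvC1 x = true := h1
      have hstep : (PySem.Dict.mk
            [("type_missing", a), ("type_mismatch", b), ("unused_code", c),
             ("import_issues", d), ("other", e)] : PySem.Dict String (List String)).modify "type_missing" [] (· ++ [x]) =
          PySem.Dict.mk
          [("type_missing", a ++ [x]), ("type_mismatch", b), ("unused_code", c),
           ("import_issues", d), ("other", e)] := rfl
      simp only [List.foldl_cons, h1, if_true, hstep, ih]
      simp [pvB1, pvB2, pvB3, pvB4, pvB5, hc]
    rw [Bool.not_eq_true] at h1
    have hc1 : pvC1 x = false := h1
    by_cases h2 : (PySem.Str.isIn "TS2322" x || PySem.Str.isIn "TS2345" x) = true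
    · have hc : pvC2 x = true := h2
      have hstep : (PySem.Dict.mk
            [("type_missing", a), ("type_mismatch", b), ("unused_code", c),
             ("import_issues", d), ("other", e)] : PySem.Dict String (List String)).modify "type_mismatch" [] (· ++ [x]) =
          PySem.Dict.mk
          [("type_missing", a), ("type_mismatch", b ++ [x]), ("unused_code", c),
           ("import_issues", d), ("other", e)] := rfl
      simp only [List.foldl_cons, h1, h2, Bool.false_eq_true, if_false, if_true, hstep, ih]
      simp [pvB1, pvB2, pvB3, pvB4, pvB5, hc1, hc]
    rw [Bool.not_eq_true] at h2
    have hc2 : pvC2 x = false := h2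
    by_cases h3 : (PySem.Str.isIn "TS6133" x || PySem.Str.isIn "TS6134" x) = true
    · have hc : pvC3 x = true := h3
      have hstep : (PySem.Dict.mk
            [("type_missing", a), ("type_mismatch", b), ("unused_code", c),
             ("import_issues", d), ("other", e)] : PySem.Dict String (List String)).modify "unused_code" [] (· ++ [x]) =
          PySem.Dict.mk
          [("type_missing", a), ("type_mismatch", b), ("unused_code", c ++ [x]),
           ("import_issues", d), ("other", e)] := rfl
      simp only [List.foldl_cons, h1, h2, h3, Bool.false_eq_true, if_false, if_true, hstep, ih]
      simp [pvB1, pvB2, pvB3, pvB4, pvB5, hc1, hc2, hc]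
    rw [Bool.not_eq_true] at h3
    have hc3 : pvC3 x = false := h3
    by_cases h4 : (PySem.Str.isIn "TS2306" x || PySem.Str.isIn "TS2305" x) = true
    · have hc : pvC4 x = true := h4
      have hstep : (PySem.Dict.mk
            [("type_missing", a), ("type_mismatch", b), ("unused_code", c),
             ("import_issues", d), ("other", e)] : PySem.Dict String (List String)).modify "import_issues" [] (· ++ [x]) =
          PySem.Dict.mk
          [("type_missing", a), ("type_mismatch", b), ("unused_code", c),
           ("import_issues", d ++ [x]), ("other", e)] := rfl
      simp only [List.foldl_cons, h1, h2, h3, h4, Bool.false_eq_true, if_false, if_true, hstep, ih]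
      simp [pvB1, pvB2, pvB3, pvB4, pvB5, hc1, hc2, hc3, hc]
    rw [Bool.not_eq_true] at h4
    have hc4 : pvC4 x = false := h4
    have hstep : (PySem.Dict.mk
          [("type_missing", a), ("type_mismatch", b), ("unused_code", c),
           ("import_issues", d), ("other", e)] : PySem.Dict String (List String)).modify "other" [] (· ++ [x]) =
        PySem.Dict.mk
          [("type_missing", a), ("type_mismatch", b), ("unused_code", c),
           ("import_issues", d), ("other", e ++ [x])] := rfl
    simp only [List.foldl_cons, h1, h2, h3, h4, Bool.false_eq_true, if_false, hstep, ih]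
    simp [pvB1, pvB2, pvB3, pvB4, pvB5, hc1, hc2, hc3, hc4]

lemma alt_eq_buckets (errors : List String) :
    categorize_errors_alt errors =
      [("type_missing", pvB1 errors), ("type_mismatch", pvB2 errors),
       ("unused_code", pvB3 errors), ("import_issues", pvB4 errors),
       ("other", pvB5 errors)] := by
  unfold categorize_errors_alt pvTable
  simp only [List.foldl_cons, List.foldl_nil, List.filter_filter, List.any_cons,
    List.any_nil, Bool.or_false, pvB1, pvB2, pvB3, pvB4, pvB5, pvC1, pvC2, pvC3, pvC4]
  rfl

-- ===== VERDICT =====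
theorem categorize_errors_spec : Claim_equal_categorize_errors := by
  intro errors _
  unfold Spec_categorize_errors categorize_errors
  rw [show (PySem.Dict.ofList
      [("type_missing", ([] : List String)), ("type_mismatch", []), ("unused_code", []),
       ("import_issues", []), ("other", [])]) =
      PySem.Dict.mk
          [("type_missing", ([] : List String)), ("type_mismatch", []), ("unused_code", []),
           ("import_issues", []), ("other", [])] from rfl]
  rw [fold_invariant, alt_eq_buckets]
  simp
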